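-- pv_equiv track=rewrite | github.com/xiansurfer/pump_ai_software | pump_ai/screwai/fault_diagnosis/f01_reason_extract.py | fault_map_func
-- ===== SOURCE A (Python) =====
-- def fault_map_func(x, fault_dict):
--     # 从故障原因中提取，哪些故障，返回故障类型列表
--     # 可能有缺失值
--     if type(x) != str:
--         return []
--
--     _fault_type_list = []
--     for word in list(fault_dict):
--         if word in x:
--             _fault_type_list.append(fault_dict[word])
--
--     #     if len(_fault_type_list) == 0:
--     #         return None
--     #     elif len(_fault_type_list) == 1:
--     #         return _fault_type_list[0]
--
--     return _fault_type_list
-- ===== SOURCE B (Python) =====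
-- def fault_map_func(x, fault_dict):
--     # Same result as A: values of fault_dict whose keys are substrings of x, in dict order.
--     # Different strategy: index x ONCE — build the set of all substrings of x whose length
--     # is an actual key length — then each key is a single set lookup (no per-key scan of x).
--     if type(x) != str:
--         return []
--     n = len(x)
--     lens = {len(w) for w in fault_dict}
--     subs = {x[i:i + l] for l in lens for i in range(n - l + 1)}
--     return [v for w, v in fault_dict.items() if w in subs]
-- ===== Notes on version B (the rewrite author's own statement) =====
-- stated objective: faster
-- what changed: Instead of scanning x once per dictionary key ('word in x' inside the loop), B builds a hash set of all substrings of x with the key lengths that occur, once, and then answers each key with a single set lookup while emitting values in dict order.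
import Mathlib
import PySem

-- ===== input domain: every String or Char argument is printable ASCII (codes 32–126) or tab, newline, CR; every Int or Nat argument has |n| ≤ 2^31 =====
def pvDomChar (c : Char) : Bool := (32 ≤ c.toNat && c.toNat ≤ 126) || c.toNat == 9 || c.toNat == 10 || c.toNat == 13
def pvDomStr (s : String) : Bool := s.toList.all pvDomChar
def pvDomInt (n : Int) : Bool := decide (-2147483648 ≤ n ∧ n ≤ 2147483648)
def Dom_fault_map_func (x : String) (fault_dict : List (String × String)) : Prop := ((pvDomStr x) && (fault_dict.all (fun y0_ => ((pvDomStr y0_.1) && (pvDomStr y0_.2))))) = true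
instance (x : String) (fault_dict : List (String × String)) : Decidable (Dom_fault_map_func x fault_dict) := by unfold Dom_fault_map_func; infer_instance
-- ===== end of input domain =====

-- B indexes x once (a set of its substrings at the occurring key lengths) instead of scanning
-- x for every key; objective: faster. Both return the matched values in dict order.

-- ===== PORT A =====
-- 'type(x) != str' is always false under the type convention (x : String), so that branch is dropped.
-- 'for word in list(fault_dict)' iterates the dict's keys in insertion order; 'fault_dict[word]'
-- always succeeds (word is a key), ported as getD with a default the lookup never uses.
def fault_map_func (x : String) (fault_dict : List (String × String)) : List String :=
  let d := PySem.Dict.ofList fault_dict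
  d.keys.foldl (fun acc word =>
    if PySem.Str.isIn word x then acc ++ [d.getD word ""] else acc) []

-- ===== PORT B =====
-- lens = {len(w) for w in fault_dict}; subs = {x[i:i+l] for l in lens for i in range(n-l+1)};
-- both sets are only membership-tested / re-collected, never iterated into the result.
-- x[i:i+l] is PySem.List.slice on x.toList (string values compared as their char lists).
def fault_map_func_alt (x : String) (fault_dict : List (String × String)) : List String :=
  let d := PySem.Dict.ofList fault_dict
  let cs := x.toList
  let n : Int := cs.length
  let lens : PySem.Set Int := PySem.Set.ofList (d.keys.map (fun w => (w.toList.length : Int)))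
  let subs : PySem.Set (List Char) :=
    PySem.Set.ofList (lens.flatMap (fun l =>
      (PySem.List.pyRange 0 (n - l + 1)).map (fun i => PySem.List.slice cs (some i) (some (i + l)))))
  (d.items.filter (fun p => subs.contains p.1.toList)).map (fun p => p.2)

-- ===== PRECONDITION & SPEC =====
def Spec_fault_map_func (x : String) (fault_dict : List (String × String)) (out : List String) : Prop := out = fault_map_func_alt x fault_dict
instance (x : String) (fault_dict : List (String × String)) (out : List String) : Decidable (Spec_fault_map_func x fault_dict out) := by unfold Spec_fault_map_func; infer_instance

-- ===== CLAIM (what is proved, stated in full; the proofs are below) =====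
def Claim_equal_fault_map_func : Prop := ∀ (x : String) (fault_dict : List (String × String)), Dom_fault_map_func x fault_dict → Spec_fault_map_func x fault_dict (fault_map_func x fault_dict)

-- ===== LEMMAS AND PROOFS =====

-- ===== VERDICT (by name: the statement is the Claim_ definition above) =====
-- every element produced for subs is a genuine substring of cs
lemma slice_mem_infix (cs : List Char) (w : List Char) (lens : List Int)
    (hpos : ∀ l ∈ lens, 0 ≤ l)
    (h : w ∈ lens.flatMap (fun l =>
      (PySem.List.pyRange 0 ((cs.length : Int) - l + 1)).map
        (fun i => PySem.List.slice cs (some i) (some (i + l))))) : w <:+: cs := by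
  simp only [List.mem_flatMap, List.mem_map] at h
  obtain ⟨l, hl, i, hi, rfl⟩ := h
  have hl0 := hpos l hl
  rw [PySem.List.mem_pyRange_one] at hi
  have h0 : (0:Int) ≤ i := hi.1
  have : PySem.List.slice cs (some i) (some (i + l)) =
      (cs.drop i.toNat).take ((i + l).toNat - i.toNat) := by
    have := PySem.List.slice_natCast cs i.toNat (i + l).toNat
    rwa [Int.toNat_of_nonneg h0, Int.toNat_of_nonneg (by omega)] at this
  rw [this]
  exact (List.take_prefix _ _).isInfix.trans (List.drop_suffix _ _).isInfix

-- conversely every substring of cs whose length occurs in lens is in subs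
lemma infix_mem_slices (cs : List Char) (w : List Char) (lens : List Int)
    (hl : (w.length : Int) ∈ lens) (hw : w <:+: cs) :
    w ∈ lens.flatMap (fun l =>
      (PySem.List.pyRange 0 ((cs.length : Int) - l + 1)).map
        (fun i => PySem.List.slice cs (some i) (some (i + l)))) := by
  obtain ⟨s, t, rfl⟩ := hw
  simp only [List.mem_flatMap, List.mem_map]
  refine ⟨(w.length : Int), hl, (s.length : Int), ?_, ?_⟩
  · rw [PySem.List.mem_pyRange_one]
    constructor
    · positivity
    · simp; omega
  · have : ((s.length : Int) + w.length) = ((s.length + w.length : Nat) : Int) := by push_cast; ring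
    rw [this, PySem.List.slice_natCast]
    simp

-- ===== VERDICT (by name: the statement is the Claim_ definition above) =====
theorem fault_map_func_spec : Claim_equal_fault_map_func := by
  intro x fault_dict _
  unfold Spec_fault_map_func fault_map_func fault_map_func_alt
  simp only [PySem.List.foldl_append_if, List.nil_append]
  set d := PySem.Dict.ofList fault_dict with hd
  have hnd : d.keys.Nodup := PySem.Dict.nodup_keys_ofList fault_dict
  rw [PySem.Dict.items_eq_map_keys d hnd "", List.filter_map, List.map_map]
  have hcomp : ((fun p : String × String => p.2) ∘ fun k => (k, d.getD k "")) =
      fun k => d.getD k "" := rfl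
  rw [hcomp]
  congr 1
  apply List.filter_congr
  intro w hw
  simp only [Function.comp]
  have hlmem : (w.toList.length : Int) ∈
      PySem.Set.ofList (d.keys.map (fun k => (k.toList.length : Int))) := by
    rw [PySem.Set.mem_ofList]
    exact List.mem_map_of_mem hw
  rw [PySem.Set.contains_eq_decide]
  apply Bool.eq_iff_iff.mpr
  rw [PySem.Str.isIn_iff_infix, decide_eq_true_iff, PySem.Set.mem_ofList]
  constructor
  · exact infix_mem_slices x.toList w.toList _ hlmem
  · apply slice_mem_infix x.toList w.toList _
    intro l hl
    rw [PySem.Set.mem_ofList] at hl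
    obtain ⟨k, -, rfl⟩ := List.mem_map.mp hl
    positivity
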